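-- pv_equiv track=rewrite | github.com/Sztuka/dj-library-manager | djlib/classify.py | guess_bucket
-- ===== SOURCE A (Python) =====
-- def guess_bucket(artist: str, title: str, bpm: str, genre: str, comment: str):
--     """
--     Zwraca tuple (ai_guess_bucket, ai_guess_comment)
--     Celem jest tylko PODPOWIEDŹ. Decyzję finalną ustawiasz w CSV.
--     """
--     a = (artist or "").lower()
--     t = (title or "").lower()
--     g = (genre or "").lower()
--     c = (comment or "").lower()
--
--     # rock'n'roll/oldies
--     if any(k in a for k in ["elvis", "beach boys", "chuck berry", "jerry lee lewis", "bill haley"]):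
--         return "CLASSICS_CANDIDATES", "oldies / rock'n'roll"
--
--     # polski singalong / klasyki
--     if any(k in a for k in ["perfect", "bajm", "lady pank", "kombi", "kombii", "łzy", "lzy", "kult", "podsiad", "podsiadło", "podsiadlo", "sanah", "myslovitz", "wilki", "zalewski"]):
--         return "OPEN_FORMAT_CANDIDATES", "polski singalong/classic vibe"
--
--     # urban / r&b / rap
--     if any(x in g for x in ["hip hop", "hip-hop", "rap", "r&b", "rnb", "trap"]):
--         return "OPEN_FORMAT_CANDIDATES", "urban / rnb / hiphop"
--
--     # latin/reggaeton
--     if any(x in g for x in ["reggaeton", "latin", "bachata"]) or "dembow" in c: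
--         return "OPEN_FORMAT_CANDIDATES", "latin/reggaeton"
--
--     # afro house
--     if "afro" in g or "afro" in c:
--         return "CLUB_CANDIDATES", "afrohouse"
--
--     # house/tech/melodic/techno/electro swing
--     if any(x in g for x in ["house", "tech house", "tech-house", "melodic", "techno", "electro swing", "swing", "progressive", "organic"]):
--         return "CLUB_CANDIDATES", "club/electronic"
--
--     # 90s/00s nostalgia
--     if any(x in a for x in ["snap", "corona", "haddaway", "darude", "sean paul", "fatboy slim", "prodigy", "bomfunk mc"]):
--         return "CLASSICS_CANDIDATES", "90s/00s nostalgia"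
--
--     return "UNDECIDED", "no confident guess"
-- ===== SOURCE B (Python) =====
-- # Order-independent rewrite: instead of an ordered if-cascade with short-circuit
-- # any() tests, flatten every keyword into one alphabetical (field, keyword, priority)
-- # index, accumulate the MINIMUM priority over all matching keywords in a single pass
-- # (no early exit, scan order provably irrelevant), and look the answer up in a table.
--
-- _OUTCOMES = [
--     ("CLASSICS_CANDIDATES", "oldies / rock'n'roll"),
--     ("OPEN_FORMAT_CANDIDATES", "polski singalong/classic vibe"),
--     ("OPEN_FORMAT_CANDIDATES", "urban / rnb / hiphop"),
--     ("OPEN_FORMAT_CANDIDATES", "latin/reggaeton"),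
--     ("CLUB_CANDIDATES", "afrohouse"),
--     ("CLUB_CANDIDATES", "club/electronic"),
--     ("CLASSICS_CANDIDATES", "90s/00s nostalgia"),
--     ("UNDECIDED", "no confident guess"),
-- ]
--
-- # One flat keyword index, listed alphabetically: the min-accumulation below makes
-- # the scan order irrelevant, so no priority ordering of the entries is needed.
-- _KEYWORDS = [
--     ("c", "afro", 4), ("g", "afro", 4), ("g", "bachata", 3), ("a", "bajm", 1),
--     ("a", "beach boys", 0), ("a", "bill haley", 0), ("a", "bomfunk mc", 6),
--     ("a", "chuck berry", 0), ("a", "corona", 6), ("a", "darude", 6),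
--     ("c", "dembow", 3), ("g", "electro swing", 5), ("a", "elvis", 0),
--     ("a", "fatboy slim", 6), ("a", "haddaway", 6), ("g", "hip hop", 2),
--     ("g", "hip-hop", 2), ("g", "house", 5), ("a", "jerry lee lewis", 0),
--     ("a", "kombi", 1), ("a", "kombii", 1), ("a", "kult", 1),
--     ("a", "lady pank", 1), ("g", "latin", 3), ("a", "lzy", 1),
--     ("g", "melodic", 5), ("a", "myslovitz", 1), ("g", "organic", 5),
--     ("a", "perfect", 1), ("a", "podsiad", 1), ("a", "podsiadlo", 1),
--     ("a", "podsiadło", 1), ("a", "prodigy", 6), ("g", "progressive", 5),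
--     ("g", "r&b", 2), ("g", "rap", 2), ("g", "reggaeton", 3), ("g", "rnb", 2),
--     ("a", "sanah", 1), ("a", "sean paul", 6), ("a", "snap", 6),
--     ("g", "swing", 5), ("g", "tech house", 5), ("g", "tech-house", 5),
--     ("g", "techno", 5), ("g", "trap", 2), ("a", "wilki", 1),
--     ("a", "zalewski", 1), ("a", "łzy", 1),
-- ]
--
--
-- def guess_bucket(artist: str, title: str, bpm: str, genre: str, comment: str):
--     hays = {
--         "a": (artist or "").lower(),
--         "g": (genre or "").lower(),
--         "c": (comment or "").lower(),
--     }
--     best = 7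
--     for field, kw, prio in _KEYWORDS:
--         if kw in hays[field]:
--             best = min(best, prio)
--     return _OUTCOMES[best]
-- ===== Notes on version B (the rewrite author's own statement) =====
-- stated objective: alternative
-- what changed: Replaces the ordered short-circuit if-cascade by a flat alphabetical (field, keyword, priority) index scanned in one order-independent pass that accumulates the minimum matching priority, then returns the corresponding row of an outcome table.
import Mathlib
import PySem

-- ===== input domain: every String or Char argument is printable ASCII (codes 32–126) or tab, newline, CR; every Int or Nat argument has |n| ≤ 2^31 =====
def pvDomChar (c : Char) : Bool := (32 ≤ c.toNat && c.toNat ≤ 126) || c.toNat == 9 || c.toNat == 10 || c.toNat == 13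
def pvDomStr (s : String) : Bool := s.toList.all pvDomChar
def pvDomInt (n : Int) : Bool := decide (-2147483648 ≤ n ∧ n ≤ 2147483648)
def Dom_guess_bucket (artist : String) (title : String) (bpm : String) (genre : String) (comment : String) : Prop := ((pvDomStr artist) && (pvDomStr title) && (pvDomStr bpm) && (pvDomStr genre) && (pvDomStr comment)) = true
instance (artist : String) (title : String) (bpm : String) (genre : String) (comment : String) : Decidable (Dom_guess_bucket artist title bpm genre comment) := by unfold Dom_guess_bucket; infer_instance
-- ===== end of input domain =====

-- B replaces A's short-circuit if-cascade by a flat alphabetical keyword index, a single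
-- min-priority accumulation pass (order-independent, no early exit) and an outcome table
-- (objective: alternative).

-- ===== PORT A =====
-- '(artist or "").lower()': the arguments are strings, so 'artist or ""' behaves as artist ('' stays '').
def guess_bucket (artist : String) (title : String) (bpm : String) (genre : String) (comment : String) : String × String :=
  let a := PySem.Str.lower artist
  let _t := PySem.Str.lower title
  let g := PySem.Str.lower genre
  let c := PySem.Str.lower comment
  if (["elvis", "beach boys", "chuck berry", "jerry lee lewis", "bill haley"].any
      (fun k => PySem.Str.isIn k a)) then ("CLASSICS_CANDIDATES", "oldies / rock'n'roll")
  else if (["perfect", "bajm", "lady pank", "kombi", "kombii", "łzy", "lzy", "kult", "podsiad",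
      "podsiadło", "podsiadlo", "sanah", "myslovitz", "wilki", "zalewski"].any
      (fun k => PySem.Str.isIn k a)) then ("OPEN_FORMAT_CANDIDATES", "polski singalong/classic vibe")
  else if (["hip hop", "hip-hop", "rap", "r&b", "rnb", "trap"].any
      (fun x => PySem.Str.isIn x g)) then ("OPEN_FORMAT_CANDIDATES", "urban / rnb / hiphop")
  else if (["reggaeton", "latin", "bachata"].any (fun x => PySem.Str.isIn x g)
      || PySem.Str.isIn "dembow" c) then ("OPEN_FORMAT_CANDIDATES", "latin/reggaeton")
  else if (PySem.Str.isIn "afro" g || PySem.Str.isIn "afro" c) then ("CLUB_CANDIDATES", "afrohouse")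
  else if (["house", "tech house", "tech-house", "melodic", "techno", "electro swing", "swing",
      "progressive", "organic"].any (fun x => PySem.Str.isIn x g)) then ("CLUB_CANDIDATES", "club/electronic")
  else if (["snap", "corona", "haddaway", "darude", "sean paul", "fatboy slim", "prodigy",
      "bomfunk mc"].any (fun x => PySem.Str.isIn x a)) then ("CLASSICS_CANDIDATES", "90s/00s nostalgia")
  else ("UNDECIDED", "no confident guess")

-- ===== PORT B =====
def gbOutcomes : List (String × String) :=
  [ ("CLASSICS_CANDIDATES", "oldies / rock'n'roll"),
    ("OPEN_FORMAT_CANDIDATES", "polski singalong/classic vibe"),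
    ("OPEN_FORMAT_CANDIDATES", "urban / rnb / hiphop"),
    ("OPEN_FORMAT_CANDIDATES", "latin/reggaeton"),
    ("CLUB_CANDIDATES", "afrohouse"),
    ("CLUB_CANDIDATES", "club/electronic"),
    ("CLASSICS_CANDIDATES", "90s/00s nostalgia"),
    ("UNDECIDED", "no confident guess") ]

-- the alphabetical flat keyword index of Source B, verbatim
def gbKeywords : List (String × String × Nat) :=
  [ ("c", "afro", 4), ("g", "afro", 4), ("g", "bachata", 3), ("a", "bajm", 1),
    ("a", "beach boys", 0), ("a", "bill haley", 0), ("a", "bomfunk mc", 6),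
    ("a", "chuck berry", 0), ("a", "corona", 6), ("a", "darude", 6),
    ("c", "dembow", 3), ("g", "electro swing", 5), ("a", "elvis", 0),
    ("a", "fatboy slim", 6), ("a", "haddaway", 6), ("g", "hip hop", 2),
    ("g", "hip-hop", 2), ("g", "house", 5), ("a", "jerry lee lewis", 0),
    ("a", "kombi", 1), ("a", "kombii", 1), ("a", "kult", 1),
    ("a", "lady pank", 1), ("g", "latin", 3), ("a", "lzy", 1),
    ("g", "melodic", 5), ("a", "myslovitz", 1), ("g", "organic", 5),
    ("a", "perfect", 1), ("a", "podsiad", 1), ("a", "podsiadlo", 1),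
    ("a", "podsiadło", 1), ("a", "prodigy", 6), ("g", "progressive", 5),
    ("g", "r&b", 2), ("g", "rap", 2), ("g", "reggaeton", 3), ("g", "rnb", 2),
    ("a", "sanah", 1), ("a", "sean paul", 6), ("a", "snap", 6),
    ("g", "swing", 5), ("g", "tech house", 5), ("g", "tech-house", 5),
    ("g", "techno", 5), ("g", "trap", 2), ("a", "wilki", 1),
    ("a", "zalewski", 1), ("a", "łzy", 1) ]

-- 'hays[field]': every field key of _KEYWORDS is present in hays, so getD with "" is exact
def guess_bucket_alt (artist : String) (title : String) (bpm : String) (genre : String) (comment : String) : String × String :=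
  let hays : PySem.Dict String String := PySem.Dict.ofList
    [ ("a", PySem.Str.lower artist), ("g", PySem.Str.lower genre), ("c", PySem.Str.lower comment) ]
  let best := gbKeywords.foldl
    (fun best x => if PySem.Str.isIn x.2.1 (PySem.Dict.getD hays x.1 "") then min best x.2.2 else best) 7
  -- '_OUTCOMES[best]': 0 ≤ best ≤ 7 < 8 always, so getD is exact
  gbOutcomes.getD best ("UNDECIDED", "no confident guess")

-- ===== PRECONDITION & SPEC =====
def Spec_guess_bucket (artist : String) (title : String) (bpm : String) (genre : String) (comment : String) (out : String × String) : Prop := out = guess_bucket_alt artist title bpm genre comment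
instance (artist : String) (title : String) (bpm : String) (genre : String) (comment : String) (out : String × String) : Decidable (Spec_guess_bucket artist title bpm genre comment out) := by unfold Spec_guess_bucket; infer_instance

-- ===== CLAIM (what is proved, stated in full; the proofs are below) =====
def Claim_equal_guess_bucket : Prop := ∀ (artist : String) (title : String) (bpm : String) (genre : String) (comment : String), Dom_guess_bucket artist title bpm genre comment → Spec_guess_bucket artist title bpm genre comment (guess_bucket artist title bpm genre comment)

-- ===== LEMMAS AND PROOFS =====

-- A's seven priority blocks, and the flat index regrouped as their concatenation
def gbG0 : List (String × String × Nat) :=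
  [ ("a", "elvis", 0), ("a", "beach boys", 0), ("a", "chuck berry", 0),
    ("a", "jerry lee lewis", 0), ("a", "bill haley", 0) ]
def gbG1 : List (String × String × Nat) :=
  [ ("a", "perfect", 1), ("a", "bajm", 1), ("a", "lady pank", 1), ("a", "kombi", 1),
    ("a", "kombii", 1), ("a", "łzy", 1), ("a", "lzy", 1), ("a", "kult", 1),
    ("a", "podsiad", 1), ("a", "podsiadło", 1), ("a", "podsiadlo", 1),
    ("a", "sanah", 1), ("a", "myslovitz", 1), ("a", "wilki", 1), ("a", "zalewski", 1) ]
def gbG2 : List (String × String × Nat) :=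
  [ ("g", "hip hop", 2), ("g", "hip-hop", 2), ("g", "rap", 2), ("g", "r&b", 2),
    ("g", "rnb", 2), ("g", "trap", 2) ]
def gbG3 : List (String × String × Nat) :=
  [ ("g", "reggaeton", 3), ("g", "latin", 3), ("g", "bachata", 3), ("c", "dembow", 3) ]
def gbG4 : List (String × String × Nat) := [ ("g", "afro", 4), ("c", "afro", 4) ]
def gbG5 : List (String × String × Nat) :=
  [ ("g", "house", 5), ("g", "tech house", 5), ("g", "tech-house", 5), ("g", "melodic", 5),
    ("g", "techno", 5), ("g", "electro swing", 5), ("g", "swing", 5),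
    ("g", "progressive", 5), ("g", "organic", 5) ]
def gbG6 : List (String × String × Nat) :=
  [ ("a", "snap", 6), ("a", "corona", 6), ("a", "haddaway", 6), ("a", "darude", 6),
    ("a", "sean paul", 6), ("a", "fatboy slim", 6), ("a", "prodigy", 6),
    ("a", "bomfunk mc", 6) ]
def gbGrouped : List (String × String × Nat) :=
  gbG0 ++ gbG1 ++ gbG2 ++ gbG3 ++ gbG4 ++ gbG5 ++ gbG6

theorem gbKeywords_perm : gbKeywords.Perm gbGrouped := by
  unfold gbGrouped gbG0 gbG1 gbG2 gbG3 gbG4 gbG5 gbG6 gbKeywords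
  decide

-- the min-accumulating fold is invariant under permutation of the keyword index
theorem gb_fold_perm (m : String × String × Nat → Bool) :
    gbKeywords.foldl (fun b x => if m x then min b x.2.2 else b) 7
      = gbGrouped.foldl (fun b x => if m x then min b x.2.2 else b) 7 :=
  gbKeywords_perm.foldl_eq' (fun x _ y _ b => by
    by_cases hx : m x <;> by_cases hy : m y <;>
      simp [hx, hy, min_assoc, min_comm x.2.2 y.2.2]) 7

-- folding a constant-priority block is 'min acc p' iff some keyword of the block matches
theorem gb_fold_group (m : String × String × Nat → Bool) (p : Nat) :
    ∀ (l : List (String × String × Nat)) (acc : Nat), (∀ x ∈ l, x.2.2 = p) →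
      l.foldl (fun b x => if m x then min b x.2.2 else b) acc
        = if l.any m then min acc p else acc := by
  intro l
  induction l with
  | nil => simp
  | cons x l ih =>
    intro acc h
    have hx := h x (by simp)
    by_cases hm : m x
    · simp [List.foldl_cons, hm, hx, ih (min acc p) (fun y hy => h y (by simp [hy]))]
    · by_cases ha : l.any m <;>
        simp [List.foldl_cons, hm, ha, ih acc (fun y hy => h y (by simp [hy]))]

-- ===== VERDICT (by name: the statement is the Claim_ definition above) =====
-- the B-side match predicate, named for the proofs (definitionally the fold's test)
def gbM (artist genre comment : String) : String × String × Nat → Bool :=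
  fun x => PySem.Str.isIn x.2.1 (PySem.Dict.getD (PySem.Dict.ofList
    [("a", PySem.Str.lower artist), ("g", PySem.Str.lower genre), ("c", PySem.Str.lower comment)])
    x.1 "")

theorem gb_any0 (artist genre comment : String) :
    (["elvis", "beach boys", "chuck berry", "jerry lee lewis", "bill haley"].any
      (fun k => PySem.Str.isIn k (PySem.Str.lower artist)))
      = gbG0.any (gbM artist genre comment) := by
  simp [gbM, gbG0, PySem.Dict.getD, PySem.Dict.ofList, PySem.Dict.update, PySem.Dict.insert, PySem.Dict.empty, PySem.Dict.get?, PySem.Dict.contains]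

theorem gb_any1 (artist genre comment : String) :
    (["perfect", "bajm", "lady pank", "kombi", "kombii", "łzy", "lzy", "kult", "podsiad",
      "podsiadło", "podsiadlo", "sanah", "myslovitz", "wilki", "zalewski"].any
      (fun k => PySem.Str.isIn k (PySem.Str.lower artist)))
      = gbG1.any (gbM artist genre comment) := by
  simp [gbM, gbG1, PySem.Dict.getD, PySem.Dict.ofList, PySem.Dict.update, PySem.Dict.insert, PySem.Dict.empty, PySem.Dict.get?, PySem.Dict.contains]

theorem gb_any2 (artist genre comment : String) :
    (["hip hop", "hip-hop", "rap", "r&b", "rnb", "trap"].any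
      (fun x => PySem.Str.isIn x (PySem.Str.lower genre)))
      = gbG2.any (gbM artist genre comment) := by
  simp [gbM, gbG2, PySem.Dict.getD, PySem.Dict.ofList, PySem.Dict.update, PySem.Dict.insert, PySem.Dict.empty, PySem.Dict.get?, PySem.Dict.contains]

theorem gb_any3 (artist genre comment : String) :
    (["reggaeton", "latin", "bachata"].any (fun x => PySem.Str.isIn x (PySem.Str.lower genre))
        || PySem.Str.isIn "dembow" (PySem.Str.lower comment))
      = gbG3.any (gbM artist genre comment) := by
  simp [gbM, gbG3, PySem.Dict.getD, PySem.Dict.ofList, PySem.Dict.update, PySem.Dict.insert, PySem.Dict.empty, PySem.Dict.get?, PySem.Dict.contains, List.find?, Bool.or_assoc]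

theorem gb_any4 (artist genre comment : String) :
    (PySem.Str.isIn "afro" (PySem.Str.lower genre) || PySem.Str.isIn "afro" (PySem.Str.lower comment))
      = gbG4.any (gbM artist genre comment) := by
  simp [gbM, gbG4, PySem.Dict.getD, PySem.Dict.ofList, PySem.Dict.update, PySem.Dict.insert, PySem.Dict.empty, PySem.Dict.get?, PySem.Dict.contains]

theorem gb_any5 (artist genre comment : String) :
    (["house", "tech house", "tech-house", "melodic", "techno", "electro swing", "swing",
      "progressive", "organic"].any (fun x => PySem.Str.isIn x (PySem.Str.lower genre)))
      = gbG5.any (gbM artist genre comment) := by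
  simp [gbM, gbG5, PySem.Dict.getD, PySem.Dict.ofList, PySem.Dict.update, PySem.Dict.insert, PySem.Dict.empty, PySem.Dict.get?, PySem.Dict.contains]

theorem gb_any6 (artist genre comment : String) :
    (["snap", "corona", "haddaway", "darude", "sean paul", "fatboy slim", "prodigy",
      "bomfunk mc"].any (fun x => PySem.Str.isIn x (PySem.Str.lower artist)))
      = gbG6.any (gbM artist genre comment) := by
  simp [gbM, gbG6, PySem.Dict.getD, PySem.Dict.ofList, PySem.Dict.update, PySem.Dict.insert, PySem.Dict.empty, PySem.Dict.get?, PySem.Dict.contains]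

theorem guess_bucket_spec : Claim_equal_guess_bucket := by
  intro artist title bpm genre comment _
  unfold Spec_guess_bucket guess_bucket guess_bucket_alt
  show _ = gbOutcomes.getD
      (List.foldl (fun b x => if gbM artist genre comment x = true then min b x.2.2 else b)
        7 gbKeywords) ("UNDECIDED", "no confident guess")
  rw [gb_fold_perm (gbM artist genre comment)]
  simp only [gbGrouped, List.foldl_append]
  rw [gb_fold_group _ 0 gbG0 _ (by decide), gb_fold_group _ 1 gbG1 _ (by decide),
      gb_fold_group _ 2 gbG2 _ (by decide), gb_fold_group _ 3 gbG3 _ (by decide),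
      gb_fold_group _ 4 gbG4 _ (by decide), gb_fold_group _ 5 gbG5 _ (by decide),
      gb_fold_group _ 6 gbG6 _ (by decide)]
  rw [gb_any0 artist genre comment, gb_any1 artist genre comment, gb_any2 artist genre comment,
      gb_any3 artist genre comment, gb_any4 artist genre comment, gb_any5 artist genre comment,
      gb_any6 artist genre comment]
  generalize gbG0.any (gbM artist genre comment) = c0
  generalize gbG1.any (gbM artist genre comment) = c1
  generalize gbG2.any (gbM artist genre comment) = c2
  generalize gbG3.any (gbM artist genre comment) = c3
  generalize gbG4.any (gbM artist genre comment) = c4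
  generalize gbG5.any (gbM artist genre comment) = c5
  generalize gbG6.any (gbM artist genre comment) = c6
  revert c0 c1 c2 c3 c4 c5 c6
  decide
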